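-- pv_equiv track=rewrite | github.com/karaokedurrif/Seedy | build_v6_old.py | extract_roles
-- ===== SOURCE A (Python) =====
-- def extract_roles(msg_list: list) -> tuple:
--     """Extrae (system, user, assistant) de la lista de mensajes."""
--     system = user = assistant = ""
--     for m in msg_list:
--         if m["role"] == "system":
--             system = m["content"]
--         elif m["role"] == "user":
--             user = m["content"]
--         elif m["role"] == "assistant":
--             assistant = m["content"]
--     return system, user, assistant
-- ===== SOURCE B (Python) =====
-- def extract_roles(msg_list: list) -> tuple:
--     """Extrae (system, user, assistant) de la lista de mensajes."""
--     found = {}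
--     for m in reversed(msg_list):
--         r = m["role"]
--         if r in ("system", "user", "assistant") and r not in found:
--             found[r] = m["content"]
--             if len(found) == 3:
--                 break
--     return (found.get("system", ""), found.get("user", ""), found.get("assistant", ""))
-- ===== Notes on version B (the rewrite author's own statement) =====
-- stated objective: alternative
-- what changed: B scans the list in reverse collecting the first occurrence of each role into a dict and stops as soon as all three roles are found, instead of A's forward last-wins pass with three scalar variables.
import Mathlib
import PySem

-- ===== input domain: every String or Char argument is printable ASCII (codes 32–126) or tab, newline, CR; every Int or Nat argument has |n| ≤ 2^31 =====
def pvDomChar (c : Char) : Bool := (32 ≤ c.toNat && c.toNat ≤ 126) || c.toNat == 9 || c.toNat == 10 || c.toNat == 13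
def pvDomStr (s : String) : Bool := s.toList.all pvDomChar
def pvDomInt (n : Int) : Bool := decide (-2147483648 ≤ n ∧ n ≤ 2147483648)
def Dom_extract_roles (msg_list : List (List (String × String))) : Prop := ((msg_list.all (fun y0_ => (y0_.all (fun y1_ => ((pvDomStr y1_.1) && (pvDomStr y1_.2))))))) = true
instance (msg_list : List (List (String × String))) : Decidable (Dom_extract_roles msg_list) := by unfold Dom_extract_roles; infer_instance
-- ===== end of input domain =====

-- B replaces A's forward last-wins pass over three scalars by a reverse first-wins scan into a dict with early exit; return values proved equal on Pre_ (no mutation involved).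

-- ===== PORT A =====
-- m["role"] / m["content"] are first-match association-list lookups; Pre_ guarantees the keys
-- are present wherever A reads them, so the total `getD ""` form is exact there.
def extract_roles (msg_list : List (List (String × String))) : String × String × String :=
  msg_list.foldl
    (fun st m =>
      if (m.lookup "role").getD "" == "system" then
        ((m.lookup "content").getD "", st.2.1, st.2.2)
      else if (m.lookup "role").getD "" == "user" then
        (st.1, (m.lookup "content").getD "", st.2.2)
      else if (m.lookup "role").getD "" == "assistant" then
        (st.1, st.2.1, (m.lookup "content").getD "")
      else st)
    ("", "", "")

-- ===== PORT B =====
def extractRolesAltGo : List (List (String × String)) → PySem.Dict String String → PySem.Dict String String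
  | [], found => found
  | m :: rest, found =>
      let r := (m.lookup "role").getD ""
      if (r == "system" || r == "user" || r == "assistant") && !found.contains r then
        let found' := found.insert r ((m.lookup "content").getD "")
        if found'.size == 3 then found' else extractRolesAltGo rest found'
      else extractRolesAltGo rest found

def extract_roles_alt (msg_list : List (List (String × String))) : String × String × String :=
  let found := extractRolesAltGo msg_list.reverse PySem.Dict.empty
  (found.getD "system" "", found.getD "user" "", found.getD "assistant" "")

-- ===== PRECONDITION & SPEC =====
-- Pre_ excludes exactly the inputs on which Python A raises KeyError: a message without a
-- "role" key, or a message whose role is system/user/assistant but has no "content" key.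
def Pre_extract_roles (msg_list : List (List (String × String))) : Prop :=
  ∀ m ∈ msg_list, (m.lookup "role").isSome = true ∧
    (((m.lookup "role").getD "" == "system" || (m.lookup "role").getD "" == "user" ||
      (m.lookup "role").getD "" == "assistant") = true → (m.lookup "content").isSome = true)
instance (msg_list : List (List (String × String))) : Decidable (Pre_extract_roles msg_list) := by
  unfold Pre_extract_roles; infer_instance
def pvWitness_extract_roles : (List (List (String × String))) :=
  [[("role", "system"), ("content", "be brief")], [("role", "user"), ("content", "hi")]]

def Spec_extract_roles (msg_list : List (List (String × String))) (out : String × String × String) : Prop := out = extract_roles_alt msg_list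
instance (msg_list : List (List (String × String))) (out : String × String × String) : Decidable (Spec_extract_roles msg_list out) := by unfold Spec_extract_roles; infer_instance

-- ===== CLAIM (what is proved, stated in full; the proofs are below) =====
def Claim_equal_extract_roles : Prop := ∀ (msg_list : List (List (String × String))), Dom_extract_roles msg_list → Pre_extract_roles msg_list → Spec_extract_roles msg_list (extract_roles msg_list)

-- ===== LEMMAS AND PROOFS =====

-- the content of the last message in l with the given role, "" if none
def lastContent (r : String) (l : List (List (String × String))) : String :=
  match l.reverse.find? (fun m => (m.lookup "role").getD "" == r) with
  | some m => (m.lookup "content").getD ""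
  | none => ""

theorem extract_roles_eq_lastContent (l : List (List (String × String))) :
    extract_roles l = (lastContent "system" l, lastContent "user" l, lastContent "assistant" l) := by
  induction l using List.reverseRecOn with
  | nil => rfl
  | append_singleton l m ih =>
    simp only [extract_roles, List.foldl_append, List.foldl_cons, List.foldl_nil] at ih ⊢
    rw [ih]
    by_cases hs : (m.lookup "role").getD "" = "system" <;>
      by_cases hu : (m.lookup "role").getD "" = "user" <;>
        by_cases ha : (m.lookup "role").getD "" = "assistant" <;>
          simp_all [lastContent, List.reverse_append]

theorem allRolesMem (ks : List String) (hnd : ks.Nodup)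
    (hsub : ∀ k ∈ ks, k = "system" ∨ k = "user" ∨ k = "assistant")
    (hlen : ks.length = 3) (r : String)
    (hr : r = "system" ∨ r = "user" ∨ r = "assistant") : r ∈ ks := by
  have hsubf : ks.toFinset ⊆ ({"system", "user", "assistant"} : Finset String) := by
    intro x hx
    rw [List.mem_toFinset] at hx
    rcases hsub x hx with h | h | h <;> simp [h]
  have hcard : ({"system", "user", "assistant"} : Finset String).card ≤ ks.toFinset.card := by
    rw [List.toFinset_card_of_nodup hnd, hlen]
    decide
  have heq := Finset.eq_of_subset_of_card_le hsubf hcard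
  have : r ∈ ks.toFinset := by
    rw [heq]
    rcases hr with h | h | h <;> simp [h]
  exact List.mem_toFinset.mp this

theorem altGo_getD (L : List (List (String × String))) (found : PySem.Dict String String)
    (hnd : found.keys.Nodup) (hsub : ∀ k ∈ found.keys, k = "system" ∨ k = "user" ∨ k = "assistant")
    (r : String) (hr : r = "system" ∨ r = "user" ∨ r = "assistant") :
    (extractRolesAltGo L found).getD r "" =
      if found.contains r then found.getD r ""
      else match L.find? (fun m => (m.lookup "role").getD "" == r) with
           | some m => (m.lookup "content").getD ""
           | none => "" := by
  induction L generalizing found with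
  | nil =>
    simp only [extractRolesAltGo, List.find?_nil]
    split_ifs with hc
    · rfl
    · exact PySem.Dict.getD_of_not_contains found "" (by simpa using hc)
  | cons m L ih =>
    simp only [extractRolesAltGo]
    by_cases hrm : ((m.lookup "role").getD "" == "system" || (m.lookup "role").getD "" == "user" ||
        (m.lookup "role").getD "" == "assistant") = true
    · by_cases hc : found.contains ((m.lookup "role").getD "") = true
      · -- role already found: skip m
        rw [if_neg (by simp [hrm, hc])]
        rw [ih found hnd hsub]
        by_cases hrr : (m.lookup "role").getD "" = r
        · rw [if_pos (hrr ▸ hc), if_pos (hrr ▸ hc)]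
        · rw [List.find?_cons_of_neg (by simp [hrr])]
      · -- new matching role: insert
        rw [if_pos (by simp [hrm, hc])]
        have hnd' := PySem.Dict.nodup_keys_insert found ((m.lookup "role").getD "")
          ((m.lookup "content").getD "") hnd
        have hsub' : ∀ k ∈ (found.insert ((m.lookup "role").getD "")
            ((m.lookup "content").getD "")).keys,
            k = "system" ∨ k = "user" ∨ k = "assistant" := by
          intro k hk
          rcases (PySem.Dict.mem_keys_insert _ _ _ _).mp hk with h | h
          · subst h; have h2 := hrm; simp at h2; tauto
          · exact hsub k h
        by_cases hsz : ((found.insert ((m.lookup "role").getD "")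
            ((m.lookup "content").getD "")).size == 3) = true
        · rw [if_pos hsz]
          -- early exit: the dict now holds all three roles
          have hall : ∀ x, x = "system" ∨ x = "user" ∨ x = "assistant" →
              x ∈ (found.insert ((m.lookup "role").getD "") ((m.lookup "content").getD "")).keys := by
            intro x hx
            apply allRolesMem _ hnd' hsub' _ x hx
            simpa [PySem.Dict.size, PySem.Dict.keys] using hsz
          by_cases hrr : (m.lookup "role").getD "" = r
          · rw [if_neg (by simp [hrr ▸ hc]), List.find?_cons_of_pos (by simp [hrr]),
              hrr, PySem.Dict.getD_insert_self]
          · have hcr : found.contains r = true := by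
              have := hall r hr
              rw [PySem.Dict.mem_keys_insert _ _ _ _] at this
              rcases this with h | h
              · exact absurd h.symm hrr
              · exact (PySem.Dict.contains_iff_mem_keys _ _).mpr h
            rw [if_pos hcr, PySem.Dict.getD_insert_of_ne _ _ _ (Ne.symm hrr)]
        · rw [if_neg hsz, ih _ hnd' hsub']
          by_cases hrr : (m.lookup "role").getD "" = r
          · rw [if_pos (by rw [← hrr]; exact PySem.Dict.contains_insert_self found _ _),
              if_neg (by simp [hrr ▸ hc]), List.find?_cons_of_pos (by simp [hrr]),
              hrr, PySem.Dict.getD_insert_self]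
          · have hcc : (found.insert ((m.lookup "role").getD "")
                ((m.lookup "content").getD "")).contains r = found.contains r := by
              rw [PySem.Dict.contains_insert]; simp [Ne.symm hrr]
            rw [hcc, PySem.Dict.getD_insert_of_ne _ _ _ (Ne.symm hrr),
              List.find?_cons_of_neg (by simp [hrr])]
    · -- role not one of the three: skip m
      rw [if_neg (by simp [hrm])]
      rw [ih found hnd hsub]
      have hrr : (m.lookup "role").getD "" ≠ r := by
        intro h; exact hrm (by rcases hr with h' | h' | h' <;> simp [h, h'])
      rw [List.find?_cons_of_neg (by simp [hrr])]

-- ===== VERDICT (by name: the statement is the Claim_ definition above) =====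
theorem extract_roles_spec : Claim_equal_extract_roles := by
  intro l _ _
  unfold Spec_extract_roles extract_roles_alt
  rw [extract_roles_eq_lastContent]
  have h := fun r hr => altGo_getD l.reverse PySem.Dict.empty (by simp [PySem.Dict.keys_empty])
    (by simp [PySem.Dict.keys_empty]) r hr
  simp only [PySem.Dict.contains_empty, Bool.false_eq_true, if_false] at h
  exact Prod.ext ((h "system" (Or.inl rfl)).symm)
    (Prod.ext ((h "user" (Or.inr (Or.inl rfl))).symm)
      ((h "assistant" (Or.inr (Or.inr rfl))).symm))
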